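-- pv_equiv track=rewrite | github.com/MorseMicro/sdio-host-model | sdio_utils.py | crc16_array_prep
-- ===== SOURCE A (Python) =====
-- def crc16_array_prep( width, data):
--     """
--     Data bus shifting is described in Figure 3-9, pg9 of the SD physical spec.
--     In wide-bus mode (4-bits) the CRC is calculated per line so
--     arrange the bytes so they go MSbit-LSbit for each line.
--     Eg:
--     D3: B0b7 B0b3 B1b7 B1b3 ...
--     D2: B0b6 B0b2 B1b6 B1b2 ...
--     D1: B0b5 B0b1 B1b5 B1b1 ...
--     D0: B0b4 B0b0 B1b4 B1b0 ...
--     So that for the CRC for D3 we have bytes which looke like: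
--     D3B0 = {B0b7,B0b3,B1b7,B1b3,B2b7,B2b3,B3b7,B3b3}
--     D2B0 = {B0b6,B0b2,B1b6,B1b2,B2b6,B2b2,B3b6,B3b2}
--     D1B0 = {B0b5,B0b1,B1b5,B1b1,B2b5,B2b1,B3b5,B3b1}
--     D0B0 = {B0b4,B0b0,B1b4,B1b0,B2b4,B2b0,B3b4,B3b0}
--     etc.
--     Return the 4 byte arrays
--     """
--     if width != 4:
--         raise Exception("Error, crc16_array_prep called but data width is not 4-bits on the SDIO interface")
--
--     def get_bits_and_shift(byte,bit1,bit0,shift):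
--             """
--             Return {byte[bit1],byte[bit0]} << shift
--             """
--             bit1 = ((byte & (1 << bit1)) >> bit1) << 1
--             bit0 = ((byte & (1 << bit0)) >> bit0)
--             return (bit1 | bit0) << shift
--
--     D0=[]
--     D1=[]
--     D2=[]
--     D3=[]
--     B0=0
--     B1=0
--     B2=0
--     B3=0
--     for byte_num in range(0,len(data)):
--         if (byte_num % 4 == 0) and byte_num > 0:
--             # Append the bytes and reset them
--             D0.append(B0)
--             D1.append(B1)
--             D2.append(B2)
--             D3.append(B3)
--             B0=0
--             B1=0
--             B2=0
--             B3=0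
--         # Get the next byte
--         B = data[byte_num]
--         if byte_num % 4 == 0:
--             B0 |= get_bits_and_shift(B,4,0,6)
--             B1 |= get_bits_and_shift(B,5,1,6)
--             B2 |= get_bits_and_shift(B,6,2,6)
--             B3 |= get_bits_and_shift(B,7,3,6)
--         if byte_num % 4 == 1:
--             B0 |= get_bits_and_shift(B,4,0,4)
--             B1 |= get_bits_and_shift(B,5,1,4)
--             B2 |= get_bits_and_shift(B,6,2,4)
--             B3 |= get_bits_and_shift(B,7,3,4)
--         if byte_num % 4 == 2:
--             B0 |= get_bits_and_shift(B,4,0,2)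
--             B1 |= get_bits_and_shift(B,5,1,2)
--             B2 |= get_bits_and_shift(B,6,2,2)
--             B3 |= get_bits_and_shift(B,7,3,2)
--         if byte_num % 4 == 3:
--             B0 |= get_bits_and_shift(B,4,0,0)
--             B1 |= get_bits_and_shift(B,5,1,0)
--             B2 |= get_bits_and_shift(B,6,2,0)
--             B3 |= get_bits_and_shift(B,7,3,0)
--     # Always append what is left over
--     D0.append(B0)
--     D1.append(B1)
--     D2.append(B2)
--     D3.append(B3)
--     return (D0,D1,D2,D3)
-- ===== SOURCE B (Python) =====
-- def _pair(B, k):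
--     """The 2-bit pair {B[k+4], B[k]} for data line k."""
--     return (((B >> (k + 4)) & 1) << 1) | ((B >> k) & 1)
--
--
-- def _chunk_acc(chunk):
--     """Accumulate a chunk of up to 4 bytes into one byte per data line."""
--     a0 = a1 = a2 = a3 = 0
--     for p, B in enumerate(chunk):
--         shift = (3 - p) * 2
--         a0 |= _pair(B, 0) << shift
--         a1 |= _pair(B, 1) << shift
--         a2 |= _pair(B, 2) << shift
--         a3 |= _pair(B, 3) << shift
--     return (a0, a1, a2, a3)
--
--
-- def _groups(data):
--     """One accumulated group per 4-byte chunk; the last (possibly empty) chunk always yields a group."""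
--     if len(data) <= 4:
--         return [_chunk_acc(data)]
--     return [_chunk_acc(data[:4])] + _groups(data[4:])
--
--
-- def crc16_array_prep(width, data):
--     if width != 4:
--         raise Exception("Error, crc16_array_prep called but data width is not 4-bits on the SDIO interface")
--     groups = _groups(data)
--     return ([g[0] for g in groups], [g[1] for g in groups],
--             [g[2] for g in groups], [g[3] for g in groups])
-- ===== Notes on version B (the rewrite author's own statement) =====
-- stated objective: simpler
-- what changed: B splits the data into 4-byte chunks and accumulates each chunk with one shared shift per byte position and a single 2-bit helper per line, replacing A's single indexed loop with per-residue boundary/accumulate branching and its 16 duplicated OR statements.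
import Mathlib
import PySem

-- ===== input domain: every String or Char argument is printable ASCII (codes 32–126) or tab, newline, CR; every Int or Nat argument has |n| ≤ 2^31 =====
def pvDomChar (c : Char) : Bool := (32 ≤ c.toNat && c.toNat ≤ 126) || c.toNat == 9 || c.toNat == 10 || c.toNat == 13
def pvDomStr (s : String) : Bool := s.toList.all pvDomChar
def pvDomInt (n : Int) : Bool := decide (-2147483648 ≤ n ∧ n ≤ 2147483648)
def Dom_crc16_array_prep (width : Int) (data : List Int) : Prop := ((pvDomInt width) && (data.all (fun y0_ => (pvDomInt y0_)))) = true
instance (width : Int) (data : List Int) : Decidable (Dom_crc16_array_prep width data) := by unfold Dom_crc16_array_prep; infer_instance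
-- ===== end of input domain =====

-- B rearranges the same bytes chunk-by-chunk (4-byte groups, one accumulator pass per chunk)
-- instead of A's single indexed loop with per-residue branching; objective: simpler.
-- Equivalence is over return values; on width ≠ 4 both Pythons raise (excluded by Pre_).

-- ===== PORT A =====
-- loop state: the four output arrays D0..D3 and the four in-progress bytes B0..B3
structure StA where
  d0 : List Int
  d1 : List Int
  d2 : List Int
  d3 : List Int
  b0 : Int
  b1 : Int
  b2 : Int
  b3 : Int
deriving Repr, DecidableEq

-- get_bits_and_shift; the bit positions and shift are literal non-negative ints in every call, so Nat is exact
def gbsA (byte : Int) (bit1 bit0 shift : Nat) : Int :=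
  let b1 := (PySem.Int.band byte (1 <<< bit1) >>> bit1) <<< 1
  let b0 := PySem.Int.band byte (1 <<< bit0) >>> bit0
  PySem.Int.bor b1 b0 <<< shift

-- first statement group of the loop body: append-and-reset at a chunk boundary
def aBoundary (byteNum : Int) (s : StA) : StA :=
  if PySem.Int.mod byteNum 4 = 0 ∧ 0 < byteNum then
    ⟨s.d0 ++ [s.b0], s.d1 ++ [s.b1], s.d2 ++ [s.b2], s.d3 ++ [s.b3], 0, 0, 0, 0⟩
  else s

-- the four 'if byte_num % 4 == r' accumulation statements
def aAcc (byteNum B : Int) (s : StA) : StA :=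
  let s := if PySem.Int.mod byteNum 4 = 0 then
    { s with b0 := PySem.Int.bor s.b0 (gbsA B 4 0 6), b1 := PySem.Int.bor s.b1 (gbsA B 5 1 6),
             b2 := PySem.Int.bor s.b2 (gbsA B 6 2 6), b3 := PySem.Int.bor s.b3 (gbsA B 7 3 6) } else s
  let s := if PySem.Int.mod byteNum 4 = 1 then
    { s with b0 := PySem.Int.bor s.b0 (gbsA B 4 0 4), b1 := PySem.Int.bor s.b1 (gbsA B 5 1 4),
             b2 := PySem.Int.bor s.b2 (gbsA B 6 2 4), b3 := PySem.Int.bor s.b3 (gbsA B 7 3 4) } else s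
  let s := if PySem.Int.mod byteNum 4 = 2 then
    { s with b0 := PySem.Int.bor s.b0 (gbsA B 4 0 2), b1 := PySem.Int.bor s.b1 (gbsA B 5 1 2),
             b2 := PySem.Int.bor s.b2 (gbsA B 6 2 2), b3 := PySem.Int.bor s.b3 (gbsA B 7 3 2) } else s
  let s := if PySem.Int.mod byteNum 4 = 3 then
    { s with b0 := PySem.Int.bor s.b0 (gbsA B 4 0 0), b1 := PySem.Int.bor s.b1 (gbsA B 5 1 0),
             b2 := PySem.Int.bor s.b2 (gbsA B 6 2 0), b3 := PySem.Int.bor s.b3 (gbsA B 7 3 0) } else s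
  s

-- 'for byte_num in range(0, len(data)): B = data[byte_num]; …' iterates the elements with their index
def aLoop : List Int → Int → StA → StA
  | [], _, s => s
  | B :: rest, byteNum, s => aLoop rest (byteNum + 1) (aAcc byteNum B (aBoundary byteNum s))

def crc16_array_prep (width : Int) (data : List Int) : List Int × List Int × List Int × List Int :=
  if width ≠ 4 then ([], [], [], [])  -- Python raises here; excluded by Pre_
  else
    let s := aLoop data 0 ⟨[], [], [], [], 0, 0, 0, 0⟩
    (s.d0 ++ [s.b0], s.d1 ++ [s.b1], s.d2 ++ [s.b2], s.d3 ++ [s.b3])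

-- ===== PORT B =====
-- _pair(B, k)
def pairB (B : Int) (k : Nat) : Int :=
  PySem.Int.bor (PySem.Int.band (B >>> (k + 4)) 1 <<< 1) (PySem.Int.band (B >>> k) 1)

-- _chunk_acc(chunk); shift = (3 - p) * 2 is non-negative in every call (chunks have ≤ 4 bytes), so .toNat is exact
def chunkAcc (chunk : List Int) : Int × Int × Int × Int :=
  (PySem.List.enumerate chunk 0).foldl
    (fun (a : Int × Int × Int × Int) pB =>
      let shift := ((3 - pB.1) * 2).toNat
      (PySem.Int.bor a.1 (pairB pB.2 0 <<< shift),
       PySem.Int.bor a.2.1 (pairB pB.2 1 <<< shift),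
       PySem.Int.bor a.2.2.1 (pairB pB.2 2 <<< shift),
       PySem.Int.bor a.2.2.2 (pairB pB.2 3 <<< shift)))
    (0, 0, 0, 0)

-- _groups(data): the 'len(data) <= 4' base case vs the recursive case on data[:4] / data[4:]
-- is exactly this pattern split (slices with non-negative literal bounds are take 4 / drop 4,
-- PySem.List.slice_to_natCast / slice_from_natCast)
def groupsB : List Int → List (Int × Int × Int × Int)
  | a :: b :: c :: d :: e :: rest => chunkAcc [a, b, c, d] :: groupsB (e :: rest)
  | data => [chunkAcc data]

def crc16_array_prep_alt (width : Int) (data : List Int) : List Int × List Int × List Int × List Int :=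
  if width ≠ 4 then ([], [], [], [])  -- Python raises here; excluded by Pre_
  else
    let gs := groupsB data
    (gs.map (·.1), gs.map (·.2.1), gs.map (·.2.2.1), gs.map (·.2.2.2))

-- ===== PRECONDITION & SPEC =====
-- Python A (and B) raise Exception unless width == 4
def Pre_crc16_array_prep (width : Int) (data : List Int) : Prop := width = 4
instance (width : Int) (data : List Int) : Decidable (Pre_crc16_array_prep width data) := by unfold Pre_crc16_array_prep; infer_instance

def pvWitness_crc16_array_prep : Int × List Int := (4, [165, 60, 127])

def Spec_crc16_array_prep (width : Int) (data : List Int) (out : List Int × List Int × List Int × List Int) : Prop := out = crc16_array_prep_alt width data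
instance (width : Int) (data : List Int) (out : List Int × List Int × List Int × List Int) : Decidable (Spec_crc16_array_prep width data out) := by unfold Spec_crc16_array_prep; infer_instance

-- ===== CLAIM (what is proved, stated in full; the proofs are below) =====
def Claim_equal_crc16_array_prep : Prop := ∀ (width : Int) (data : List Int), Dom_crc16_array_prep width data → Pre_crc16_array_prep width data → Spec_crc16_array_prep width data (crc16_array_prep width data)

-- ===== LEMMAS AND PROOFS =====

lemma nat_and_two_pow (n m : Nat) : (2^n) &&& m = (m / 2^n % 2) * 2^n := by
  rw [Nat.and_comm, Nat.and_two_pow, Nat.toNat_testBit]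

lemma band_two_pow (B : Int) (n : Nat) : PySem.Int.band B ((2:Int)^n) = ((B >>> n) % 2) * 2^n := by
  rw [Int.shiftRight_eq_div_pow]
  unfold PySem.Int.band
  have h2 : (0:Int) ≤ 2^n := by positivity
  have htn : ((2:Int)^n).toNat = 2^n := by
    rw [show ((2:Int)^n) = ((2^n : Nat) : Int) by push_cast; ring, Int.toNat_natCast]
  rcases le_or_gt 0 B with hB | hB
  · simp only [hB, h2, if_true, htn]
    rw [Nat.and_two_pow, Nat.toNat_testBit]
    rw [show B = ((B.toNat : Nat) : Int) by omega]
    norm_cast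
  · rw [if_neg (by omega), if_pos h2, htn, nat_and_two_pow]
    set m : Nat := (-B - 1).toNat with hm
    have hBm : B = -((m:Int) + 1) := by omega
    set q : Nat := m / 2^n with hq
    set r : Nat := m % 2^n with hr
    have hqr : q * 2^n + r = m := by rw [hq, hr, Nat.mul_comm]; exact Nat.div_add_mod m (2^n)
    have hrlt : r < 2^n := Nat.mod_lt _ (Nat.two_pow_pos n)
    have hqr' : (q:Int) * 2^n + r = m := by exact_mod_cast hqr
    have hcast : ((2^n - 1 - r : Nat) : Int) = 2^n - 1 - (r:Int) := by
      omega
    have hdiv : B / (2:Int)^n = -(q:Int) - 1 := by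
      have := (Int.ediv_emod_unique (a := B) (b := (2:Int)^n)
        (r := ((2^n - 1 - r : Nat) : Int)) (q := -(q:Int) - 1) (by positivity)).mpr
      refine (this ⟨?_, ?_, ?_⟩).1
      · rw [hcast, hBm]; linear_combination -hqr'
      · positivity
      · rw [hcast]; have : (r:Int) < 2^n := by exact_mod_cast hrlt
        omega
    rw [show ((2^n:Nat):Int) = (2:Int)^n by push_cast; ring, hdiv]
    have h1 : q % 2 * 2^n ≤ 2^n := by
      have : q % 2 ≤ 1 := by omega
      calc q % 2 * 2^n ≤ 1 * 2^n := Nat.mul_le_mul_right _ this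
        _ = 2^n := by ring
    rw [Nat.cast_sub h1]
    have hmod : (-(q:Int) - 1) % 2 = 1 - (q:Int) % 2 := by omega
    rw [hmod]
    push_cast
    ring

lemma band_one_shift (B : Int) (n : Nat) : PySem.Int.band B (1 <<< n) >>> n = PySem.Int.band (B >>> n) 1 := by
  rw [show (((1 <<< n : Nat)) : Int) = (2:Int)^n by rw [Nat.one_shiftLeft]; push_cast; ring]
  rw [band_two_pow, PySem.Int.band_one,
      PySem.Int.mod_eq_emod_of_pos (by norm_num), Int.shiftRight_eq_div_pow,
      Int.shiftRight_eq_div_pow, show ((2^n : Nat) : Int) = (2:Int)^n by push_cast; ring,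
      Int.mul_ediv_cancel _ (by positivity)]

-- A's helper equals B's helper shifted: get_bits_and_shift(B, k+4, k, s) = _pair(B, k) << s
lemma gbs_eq (B : Int) (k s : Nat) : gbsA B (k + 4) k s = pairB B k <<< ((s : Nat) : Int) := by
  rw [Int.shiftLeft_natCast_right]
  unfold gbsA pairB
  rw [band_one_shift, band_one_shift]

def toOut (s : StA) : List Int × List Int × List Int × List Int :=
  (s.d0 ++ [s.b0], s.d1 ++ [s.b1], s.d2 ++ [s.b2], s.d3 ++ [s.b3])

lemma gbs0 (B : Int) (s : Nat) : gbsA B 4 0 s = pairB B 0 <<< ((s : Nat) : Int) := gbs_eq B 0 s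
lemma gbs1 (B : Int) (s : Nat) : gbsA B 5 1 s = pairB B 1 <<< ((s : Nat) : Int) := gbs_eq B 1 s
lemma gbs2 (B : Int) (s : Nat) : gbsA B 6 2 s = pairB B 2 <<< ((s : Nat) : Int) := gbs_eq B 2 s
lemma gbs3 (B : Int) (s : Nat) : gbsA B 7 3 s = pairB B 3 <<< ((s : Nat) : Int) := gbs_eq B 3 s

lemma bpos (i : Int) (s : StA) (h0 : i % 4 = 0) (hp : 0 < i) :
    aBoundary i s = ⟨s.d0 ++ [s.b0], s.d1 ++ [s.b1], s.d2 ++ [s.b2], s.d3 ++ [s.b3], 0, 0, 0, 0⟩ := by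
  simp [aBoundary, h0, hp]

lemma bzero (s : StA) : aBoundary 0 s = s := by simp [aBoundary]

lemma bskip (i : Int) (s : StA) (h0 : i % 4 ≠ 0) : aBoundary i s = s := by
  simp [aBoundary, h0]

lemma aAcc0 (i B : Int) (s : StA) (h : i % 4 = 0) :
    aAcc i B s = { s with b0 := PySem.Int.bor s.b0 (gbsA B 4 0 6), b1 := PySem.Int.bor s.b1 (gbsA B 5 1 6),
                          b2 := PySem.Int.bor s.b2 (gbsA B 6 2 6), b3 := PySem.Int.bor s.b3 (gbsA B 7 3 6) } := by
  simp [aAcc, h]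

lemma aAcc1 (i B : Int) (s : StA) (h : i % 4 = 1) :
    aAcc i B s = { s with b0 := PySem.Int.bor s.b0 (gbsA B 4 0 4), b1 := PySem.Int.bor s.b1 (gbsA B 5 1 4),
                          b2 := PySem.Int.bor s.b2 (gbsA B 6 2 4), b3 := PySem.Int.bor s.b3 (gbsA B 7 3 4) } := by
  simp [aAcc, h]

lemma aAcc2 (i B : Int) (s : StA) (h : i % 4 = 2) :
    aAcc i B s = { s with b0 := PySem.Int.bor s.b0 (gbsA B 4 0 2), b1 := PySem.Int.bor s.b1 (gbsA B 5 1 2),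
                          b2 := PySem.Int.bor s.b2 (gbsA B 6 2 2), b3 := PySem.Int.bor s.b3 (gbsA B 7 3 2) } := by
  simp [aAcc, h]

lemma aAcc3 (i B : Int) (s : StA) (h : i % 4 = 3) :
    aAcc i B s = { s with b0 := PySem.Int.bor s.b0 (gbsA B 4 0 0), b1 := PySem.Int.bor s.b1 (gbsA B 5 1 0),
                          b2 := PySem.Int.bor s.b2 (gbsA B 6 2 0), b3 := PySem.Int.bor s.b3 (gbsA B 7 3 0) } := by
  simp [aAcc, h]

-- the main induction: from any chunk boundary (index 4*(m+1), pending group c0..c3), A's loop plus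
-- its final append emits c0..c3 and then exactly B's groups of the remaining (non-empty) data
lemma main_loop : ∀ (n : Nat) (data : List Int), data.length ≤ n → data ≠ [] →
    ∀ (m : Nat) (c0 c1 c2 c3 : Int) (d0 d1 d2 d3 : List Int),
    toOut (aLoop data (4 * ((m:Int) + 1)) ⟨d0, d1, d2, d3, c0, c1, c2, c3⟩) =
    (d0 ++ c0 :: (groupsB data).map (·.1), d1 ++ c1 :: (groupsB data).map (·.2.1),
     d2 ++ c2 :: (groupsB data).map (·.2.2.1), d3 ++ c3 :: (groupsB data).map (·.2.2.2)) := by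
  intro n
  induction n with
  | zero =>
    intro data hlen hne
    cases data with
    | nil => exact absurd rfl hne
    | cons x xs => simp at hlen
  | succ n ih =>
    intro data hlen hne m c0 c1 c2 c3 d0 d1 d2 d3
    have hm : (0:Int) ≤ (m:Int) := Int.natCast_nonneg m
    have e0 : (4 * ((m:Int) + 1)) % 4 = 0 := by omega
    have p0 : (0:Int) < 4 * ((m:Int) + 1) := by omega
    have ee1 : (4 * ((m:Int) + 1) + 1) % 4 = 1 := by omega
    have ee2 : (4 * ((m:Int) + 1) + 1 + 1) % 4 = 2 := by omega
    have ee3 : (4 * ((m:Int) + 1) + 1 + 1 + 1) % 4 = 3 := by omega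
    have ne1 : (4 * ((m:Int) + 1) + 1) % 4 ≠ 0 := by omega
    have ne2 : (4 * ((m:Int) + 1) + 1 + 1) % 4 ≠ 0 := by omega
    have ne3 : (4 * ((m:Int) + 1) + 1 + 1 + 1) % 4 ≠ 0 := by omega
    match data with
    | [a] =>
      simp only [aLoop]
      rw [bpos _ _ e0 p0, aAcc0 _ _ _ e0]
      simp [toOut, groupsB, chunkAcc, PySem.List.enumerate, gbs0, gbs1, gbs2, gbs3, List.append_assoc]
    | [a, b] =>
      simp only [aLoop]
      rw [bpos _ _ e0 p0, aAcc0 _ _ _ e0, bskip _ _ ne1, aAcc1 _ _ _ ee1]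
      simp [toOut, groupsB, chunkAcc, PySem.List.enumerate, gbs0, gbs1, gbs2, gbs3, List.append_assoc]
    | [a, b, c] =>
      simp only [aLoop]
      rw [bpos _ _ e0 p0, aAcc0 _ _ _ e0, bskip _ _ ne1, aAcc1 _ _ _ ee1, bskip _ _ ne2, aAcc2 _ _ _ ee2]
      simp [toOut, groupsB, chunkAcc, PySem.List.enumerate, gbs0, gbs1, gbs2, gbs3, List.append_assoc]
    | [a, b, c, d] =>
      simp only [aLoop]
      rw [bpos _ _ e0 p0, aAcc0 _ _ _ e0, bskip _ _ ne1, aAcc1 _ _ _ ee1, bskip _ _ ne2, aAcc2 _ _ _ ee2, bskip _ _ ne3, aAcc3 _ _ _ ee3]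
      simp [toOut, groupsB, chunkAcc, PySem.List.enumerate, gbs0, gbs1, gbs2, gbs3, List.append_assoc]
    | a :: b :: c :: d :: e :: rest =>
      rw [aLoop, aLoop, aLoop, aLoop]
      rw [bpos _ _ e0 p0, aAcc0 _ _ _ e0, bskip _ _ ne1, aAcc1 _ _ _ ee1, bskip _ _ ne2, aAcc2 _ _ _ ee2, bskip _ _ ne3, aAcc3 _ _ _ ee3]
      dsimp only
      rw [show (4 * ((m:Int) + 1) + 1 + 1 + 1 + 1) = 4 * (((m + 1 : Nat) : Int) + 1) by push_cast; ring]
      rw [ih (e :: rest) (by simp at hlen ⊢; omega) (by simp) (m + 1)]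
      simp [groupsB, chunkAcc, PySem.List.enumerate, gbs0, gbs1, gbs2, gbs3, List.append_assoc]

-- ===== VERDICT (by name: the statement is the Claim_ definition above) =====
theorem crc16_array_prep_spec : Claim_equal_crc16_array_prep := by
  intro width data _ hpre
  unfold Spec_crc16_array_prep crc16_array_prep crc16_array_prep_alt Pre_crc16_array_prep at *
  subst hpre
  simp only [ne_eq, not_true_eq_false, if_false]
  have e0 : ((0:Int)) % 4 = 0 := by norm_num
  have ee1 : ((0:Int) + 1) % 4 = 1 := by norm_num
  have ee2 : ((0:Int) + 1 + 1) % 4 = 2 := by norm_num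
  have ee3 : ((0:Int) + 1 + 1 + 1) % 4 = 3 := by norm_num
  have ne1 : ((0:Int) + 1) % 4 ≠ 0 := by norm_num
  have ne2 : ((0:Int) + 1 + 1) % 4 ≠ 0 := by norm_num
  have ne3 : ((0:Int) + 1 + 1 + 1) % 4 ≠ 0 := by norm_num
  show toOut (aLoop data 0 ⟨[], [], [], [], 0, 0, 0, 0⟩) = _
  match data with
  | [] => simp [aLoop, groupsB, chunkAcc, PySem.List.enumerate, toOut]
  | [a] =>
      simp only [aLoop]
      rw [bzero, aAcc0 _ _ _ e0]
      simp [toOut, groupsB, chunkAcc, PySem.List.enumerate, gbs0, gbs1, gbs2, gbs3]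
  | [a, b] =>
      simp only [aLoop]
      rw [bzero, aAcc0 _ _ _ e0, bskip _ _ ne1, aAcc1 _ _ _ ee1]
      simp [toOut, groupsB, chunkAcc, PySem.List.enumerate, gbs0, gbs1, gbs2, gbs3]
  | [a, b, c] =>
      simp only [aLoop]
      rw [bzero, aAcc0 _ _ _ e0, bskip _ _ ne1, aAcc1 _ _ _ ee1, bskip _ _ ne2, aAcc2 _ _ _ ee2]
      simp [toOut, groupsB, chunkAcc, PySem.List.enumerate, gbs0, gbs1, gbs2, gbs3]
  | [a, b, c, d] =>
      simp only [aLoop]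
      rw [bzero, aAcc0 _ _ _ e0, bskip _ _ ne1, aAcc1 _ _ _ ee1, bskip _ _ ne2, aAcc2 _ _ _ ee2, bskip _ _ ne3, aAcc3 _ _ _ ee3]
      simp [toOut, groupsB, chunkAcc, PySem.List.enumerate, gbs0, gbs1, gbs2, gbs3]
  | a :: b :: c :: d :: e :: rest =>
      rw [aLoop, aLoop, aLoop, aLoop]
      rw [bzero, aAcc0 _ _ _ e0, bskip _ _ ne1, aAcc1 _ _ _ ee1, bskip _ _ ne2, aAcc2 _ _ _ ee2, bskip _ _ ne3, aAcc3 _ _ _ ee3]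
      dsimp only
      rw [show ((0:Int) + 1 + 1 + 1 + 1) = 4 * (((0 : Nat) : Int) + 1) by norm_num]
      rw [main_loop (e :: rest).length (e :: rest) le_rfl (by simp) 0]
      simp [groupsB, chunkAcc, PySem.List.enumerate, gbs0, gbs1, gbs2, gbs3]
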